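-- pv_equiv track=rewrite | github.com/almastasoyan/Python_Course | lesson17.py | pluralize
-- ===== SOURCE A (Python) =====
-- def pluralize(lst):
--     res = []
--     for i in lst:
--         if lst.count(i)>1:
--             res.append(i + 's')
--         else:
--             res.append(i)
--     return set(res)
-- ===== SOURCE B (Python) =====
-- def pluralize(lst):
--     srt = sorted(lst)
--     dup = {a for a, b in zip(srt, srt[1:]) if a == b}
--     return {x + 's' if x in dup else x for x in lst}
-- ===== Notes on version B (the rewrite author's own statement) =====
-- stated objective: faster
-- what changed: B sorts the list and finds duplicated elements by scanning adjacent pairs of the sorted copy, then maps the original list once against that duplicate set, instead of A's per-element lst.count scan over the whole list.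
import Mathlib
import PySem

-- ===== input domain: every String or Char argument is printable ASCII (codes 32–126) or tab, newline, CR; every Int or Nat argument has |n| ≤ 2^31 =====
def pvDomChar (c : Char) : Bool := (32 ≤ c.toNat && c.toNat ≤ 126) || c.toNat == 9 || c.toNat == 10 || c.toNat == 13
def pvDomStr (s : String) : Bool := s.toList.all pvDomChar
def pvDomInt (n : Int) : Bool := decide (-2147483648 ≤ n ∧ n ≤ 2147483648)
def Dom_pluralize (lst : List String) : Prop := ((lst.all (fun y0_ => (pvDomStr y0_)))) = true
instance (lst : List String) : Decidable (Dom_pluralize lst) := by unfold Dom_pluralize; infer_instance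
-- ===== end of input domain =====

-- B finds the duplicated elements by sorting and scanning adjacent pairs instead of A's per-element lst.count scan, then maps the original list once (a different algorithm; return value compared as a set).
-- ===== PORT A =====
def pluralize (lst : List String) : List String :=
  let res := lst.foldl (fun res i =>
    if PySem.List.count lst i > 1 then res ++ [i ++ "s"] else res ++ [i]) []
  PySem.Set.ofList res

-- ===== PORT B =====
def pluralize_alt (lst : List String) : List String :=
  let srt := PySem.List.sorted lst (fun x => x) false
  let dup : PySem.Set String :=
    (srt.zip (PySem.List.slice srt (some 1) none)).foldl
      (fun s ab => if ab.1 == ab.2 then PySem.Set.add s ab.1 else s)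
      PySem.Set.empty
  lst.foldl
    (fun s x => PySem.Set.add s (if PySem.Set.contains dup x then x ++ "s" else x))
    PySem.Set.empty

-- ===== PRECONDITION & SPEC =====
def Spec_pluralize (lst : List String) (out : List String) : Prop := out = pluralize_alt lst
instance (lst : List String) (out : List String) : Decidable (Spec_pluralize lst out) := by unfold Spec_pluralize; infer_instance

-- ===== CLAIM (what is proved, stated in full; the proofs are below) =====
def Claim_equal_pluralize : Prop := ∀ (lst : List String), Dom_pluralize lst → Spec_pluralize lst (pluralize lst)

-- ===== LEMMAS AND PROOFS =====

-- membership in B's duplicate-collecting fold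
theorem mem_foldl_add_fst {α : Type} [BEq α] [LawfulBEq α] (l : List (α × α)) (s : PySem.Set α) (x : α) :
    x ∈ l.foldl (fun s ab => if ab.1 == ab.2 then PySem.Set.add s ab.1 else s) s ↔
      x ∈ s ∨ ∃ ab ∈ l, ab.1 = ab.2 ∧ ab.1 = x := by
  induction l generalizing s with
  | nil => simp
  | cons ab l ih =>
    simp only [List.foldl_cons, ih, List.mem_cons]
    by_cases h : ab.1 = ab.2 <;>
      simp only [h, beq_iff_eq, beq_self_eq_true, if_true, if_false, PySem.Set.mem_add] <;>
      aesop

-- in a (≤)-sorted list, an element has an equal adjacent neighbour iff it occurs more than once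
theorem adj_dup_iff (xs : List String) (h : xs.Pairwise (· ≤ ·)) (x : String) :
    (∃ ab ∈ xs.zip xs.tail, ab.1 = ab.2 ∧ ab.1 = x) ↔ 1 < xs.count x := by
  induction xs with
  | nil => simp
  | cons a t ih =>
    cases t with
    | nil =>
      constructor
      · rintro ⟨ab, hm, -⟩
        simp at hm
      · intro hc
        have := List.count_le_length (l := [a]) (a := x)
        simp at this
        omega
    | cons b t' =>
      have hp : (b :: t').Pairwise (· ≤ ·) := h.of_cons
      have ih' := ih hp
      have hab : a ≤ b := (List.pairwise_cons.mp h).1 b (by simp)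
      have hbt : ∀ y ∈ t', b ≤ y := fun y hy => (List.pairwise_cons.mp hp).1 y hy
      constructor
      · rintro ⟨ab, hmem, heq, hx⟩
        rcases List.mem_cons.mp hmem with h1 | h1
        · subst h1
          simp only at heq hx
          subst hx
          simp [heq]
        · have := ih'.mp ⟨ab, h1, heq, hx⟩
          simp only [List.count_cons] at this ⊢
          split_ifs at this ⊢ <;> omega
      · intro hc
        by_cases hx : x = a
        · subst hx
          by_cases hab2 : x = b
          · exact ⟨(x, b), by simp, hab2, rfl⟩
          · exfalso
            have hnot : x ∉ b :: t' := by
              intro hmem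
              rcases List.mem_cons.mp hmem with h1 | h1
              · exact hab2 h1
              · exact hab2 (le_antisymm hab (hbt x h1) ▸ rfl)
            have h0 : (b :: t').count x = 0 := List.count_eq_zero.mpr hnot
            have h1 : (x :: b :: t').count x = (b :: t').count x + 1 :=
              List.count_cons_self
            omega
        · have h2 : 1 < (b :: t').count x := by
            have : (a :: b :: t').count x = (b :: t').count x := by
              simp [List.count_cons, Ne.symm hx]
            omega
          obtain ⟨ab, hm, he, hx2⟩ := ih'.mpr h2
          exact ⟨ab, List.mem_cons_of_mem _ hm, he, hx2⟩

-- ===== VERDICT (by name: the statement is the Claim_ definition above) =====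
theorem pluralize_spec : Claim_equal_pluralize := by
  intro lst _
  unfold Spec_pluralize pluralize pluralize_alt
  dsimp only
  rw [PySem.List.slice_from_one]
  set srt := PySem.List.sorted lst (fun x => x) false with hsrt
  set dup : PySem.Set String :=
    (srt.zip srt.tail).foldl
      (fun s ab => if ab.1 == ab.2 then PySem.Set.add s ab.1 else s)
      PySem.Set.empty with hdup
  set f : String → String := fun i => if PySem.List.count lst i > 1 then i ++ "s" else i with hf
  -- the two branch tests agree pointwise
  have hmemdup : ∀ x : String, x ∈ dup ↔ 1 < lst.count x := by
    intro x
    rw [hdup, mem_foldl_add_fst]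
    have hperm := PySem.List.sorted_perm lst (fun x => x) false
    have hc : srt.count x = lst.count x := hperm.count_eq x
    have hadj := adj_dup_iff srt (by rw [hsrt]; exact PySem.List.sorted_pairwise lst (fun x => x)) x
    simp only [PySem.Set.empty] at *
    constructor
    · rintro (hs | hpair)
      · simp at hs
      · exact hc ▸ hadj.mp hpair
    · intro hcnt
      exact Or.inr (hadj.mpr (hc ▸ hcnt))
  have hfun : (fun (x : String) => if PySem.Set.contains dup x then x ++ "s" else x) = f := by
    funext x
    by_cases hcnt : 1 < lst.count x
    · have hm : x ∈ dup := (hmemdup x).mpr hcnt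
      simp [hf, PySem.List.count, hcnt, hm]
    · have hm : x ∉ dup := fun h => hcnt ((hmemdup x).mp h)
      simp [hf, PySem.List.count, hcnt, hm]
  -- A's output is ofList (lst.map f)
  have hA : lst.foldl (fun res i =>
      if PySem.List.count lst i > 1 then res ++ [i ++ "s"] else res ++ [i]) []
      = lst.map f := by
    rw [show (fun (res : List String) i =>
      if PySem.List.count lst i > 1 then res ++ [i ++ "s"] else res ++ [i])
      = (fun res i => res ++ [f i]) from by funext res i; simp only [hf]; split <;> rfl]
    simpa using PySem.List.foldl_append_singleton_eq_map f lst []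
  -- B's output is ofList (lst.map f) as well
  have hB : lst.foldl
      (fun s x => PySem.Set.add s (if PySem.Set.contains dup x then x ++ "s" else x))
      PySem.Set.empty = PySem.Set.ofList (lst.map f) := by
    rw [PySem.Set.ofList_eq_foldl, ← List.foldl_map]
    simp only [hfun]
    rfl
  rw [hA, hB]
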